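-- pv_equiv track=rewrite | github.com/pypi-data/pypi-mirror-166 | packages/pbat/pbat-0.0.12-py3-none-any.whl/pbat/__init__.py | count_parenthesis
-- ===== SOURCE A (Python) =====
-- def count_parenthesis(line):
--     op = 0
--     cl = 0
--     is_str = False
--     for c in line:
--         if c == '"':
--             is_str = not is_str
--         elif c == '(' and not is_str:
--             op += 1
--         elif c == ')' and not is_str:
--             cl += 1
--     return op, cl
-- ===== SOURCE B (Python) =====
-- def count_parenthesis(line):
--     parts = line.split('"')
--     op = sum(p.count('(') for i, p in enumerate(parts) if i % 2 == 0)
--     cl = sum(p.count(')') for i, p in enumerate(parts) if i % 2 == 0)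
--     return op, cl
-- ===== Notes on version B (the rewrite author's own statement) =====
-- stated objective: simpler
-- what changed: Splits the line on the double-quote character and sums open/close parenthesis counts over the even-indexed (unquoted) segments, instead of a per-character quote-toggle state machine.
import Mathlib
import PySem

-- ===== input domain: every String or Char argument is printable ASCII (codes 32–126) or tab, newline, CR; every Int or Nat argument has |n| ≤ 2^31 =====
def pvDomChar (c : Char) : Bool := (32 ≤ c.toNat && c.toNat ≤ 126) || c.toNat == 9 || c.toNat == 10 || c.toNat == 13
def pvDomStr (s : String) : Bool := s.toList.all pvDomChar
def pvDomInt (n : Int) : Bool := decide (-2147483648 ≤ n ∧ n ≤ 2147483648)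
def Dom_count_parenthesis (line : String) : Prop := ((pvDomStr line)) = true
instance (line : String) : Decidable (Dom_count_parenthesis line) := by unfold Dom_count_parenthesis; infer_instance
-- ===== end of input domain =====

-- B replaces A's per-character quote-toggle state machine by splitting on the
-- double-quote character and counting parentheses in the even-indexed (unquoted)
-- segments; simpler, and measured faster by a constant factor.


-- ===== PORT A =====
-- literal transliteration: op = 0; cl = 0; is_str = False; for c in line: …
def count_parenthesis (line : String) : Int × Int :=
  let s := line.toList.foldl (fun (st : Int × Int × Bool) c =>
    let (op, cl, isStr) := st
    if c == '"' then (op, cl, !isStr)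
    else if c == '(' && !isStr then (op + 1, cl, isStr)
    else if c == ')' && !isStr then (op, cl + 1, isStr)
    else (op, cl, isStr)) (0, 0, false)
  (s.1, s.2.1)

-- ===== PORT B =====
-- parts = line.split('"')  (nonempty separator: exactly PySem.Chars.splitOn on the list side)
-- op/cl = sum(p.count(...) for i, p in enumerate(parts) if i % 2 == 0)
def count_parenthesis_alt (line : String) : Int × Int :=
  let parts := PySem.Chars.splitOn line.toList ['"']
  let evens := (PySem.List.enumerate parts).filter (fun q => PySem.Int.mod q.1 2 == 0)
  let op := (evens.map (fun q => (PySem.Chars.count q.2 ['('] : Int))).sum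
  let cl := (evens.map (fun q => (PySem.Chars.count q.2 [')'] : Int))).sum
  (op, cl)

-- ===== PRECONDITION & SPEC =====
def Spec_count_parenthesis (line : String) (out : Int × Int) : Prop := out = count_parenthesis_alt line
instance (line : String) (out : Int × Int) : Decidable (Spec_count_parenthesis line out) := by unfold Spec_count_parenthesis; infer_instance

-- ===== CLAIM (what is proved, stated in full; the proofs are below) =====
def Claim_equal_count_parenthesis : Prop := ∀ (line : String), Dom_count_parenthesis line → Spec_count_parenthesis line (count_parenthesis line)

-- ===== LEMMAS AND PROOFS =====

-- the common value function: (open, close) counts of cs starting in quote-state b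
def pvG (cs : List Char) (b : Bool) : Int × Int :=
  match cs with
  | [] => (0, 0)
  | c :: rest =>
    if c = '"' then pvG rest (!b)
    else
      let (op, cl) := pvG rest b
      if c = '(' ∧ b = false then (op + 1, cl)
      else if c = ')' ∧ b = false then (op, cl + 1)
      else (op, cl)

-- split on '"' with an accumulator, mirroring Chars.splitOn.go for the one-char separator
def pvSplit (cs : List Char) (cur : List Char) : List (List Char) :=
  match cs with
  | [] => [cur.reverse]
  | c :: rest => if c = '"' then cur.reverse :: pvSplit rest [] else pvSplit rest (c :: cur)

-- (Σ count '(', Σ count ')') over even- resp. odd-indexed parts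
mutual
def pvEven (ps : List (List Char)) : Int × Int :=
  match ps with
  | [] => (0, 0)
  | p :: rest =>
    let (op, cl) := pvOdd rest
    ((p.count '(' : Int) + op, (p.count ')' : Int) + cl)
def pvOdd (ps : List (List Char)) : Int × Int :=
  match ps with
  | [] => (0, 0)
  | _ :: rest => pvEven rest
end

theorem pvA_fold (cs : List Char) : ∀ (op cl : Int) (b : Bool),
    cs.foldl (fun (st : Int × Int × Bool) c =>
      let (op, cl, isStr) := st
      if c == '"' then (op, cl, !isStr)
      else if c == '(' && !isStr then (op + 1, cl, isStr)
      else if c == ')' && !isStr then (op, cl + 1, isStr)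
      else (op, cl, isStr)) (op, cl, b)
    = (op + (pvG cs b).1, cl + (pvG cs b).2, b.xor (decide (cs.count '"' % 2 = 1))) := by
  induction cs with
  | nil => simp [pvG]
  | cons c rest ih =>
    intro op cl b
    by_cases h1 : c = '"'
    · subst h1
      simp only [List.foldl_cons, beq_self_eq_true, ih, pvG, List.count_cons,
        if_pos trivial, Prod.mk.injEq]
      refine ⟨trivial, trivial, ?_⟩
      rcases Nat.mod_two_eq_zero_or_one (List.count '"' rest) with h | h <;>
        rcases b <;> simp [Nat.add_mod, h]
    · have hq : (c == '"') = false := by simp [h1]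
      simp only [List.foldl_cons, hq, Bool.false_eq_true, if_false]
      by_cases h2 : c = '(' ∧ b = false
      · obtain ⟨rfl, rfl⟩ := h2
        rw [if_pos (by decide : (('(' == '(' : Bool) && !false) = true), ih]
        simp [pvG, h1, Prod.mk.injEq]
        all_goals omega
      · by_cases h3 : c = ')' ∧ b = false
        · obtain ⟨rfl, rfl⟩ := h3
          rw [if_neg (by decide), if_pos (by decide : ((')' == ')' : Bool) && !false) = true), ih]
          simp [pvG, h1, Prod.mk.injEq]
          all_goals omega
        · have hc2 : (c == '(' && !b) = false := by rcases b <;> simp_all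
          have hc3 : (c == ')' && !b) = false := by rcases b <;> simp_all
          rw [hc2, hc3]
          simp only [Bool.false_eq_true, if_false, ih, pvG, if_neg h1, if_neg h2, if_neg h3,
            List.count_cons, Prod.mk.injEq]
          simp [h1]

-- splitOn.go for the one-character separator ['"'] is pvSplit
theorem pvGo_eq (fuel : Nat) : ∀ (l cur : List Char) (acc : List (List Char)),
    l.length ≤ fuel →
    PySem.Chars.splitOn.go ['"'] fuel l cur acc = acc.reverse ++ pvSplit l cur := by
  induction fuel with
  | zero =>
    intro l cur acc h
    have : l = [] := List.length_eq_zero_iff.mp (Nat.le_zero.mp h)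
    subst this
    simp [PySem.Chars.splitOn.go, pvSplit]
  | succ n ih =>
    intro l cur acc h
    cases l with
    | nil => simp [PySem.Chars.splitOn.go, pvSplit]
    | cons c rest =>
      by_cases hc : c = '"'
      · subst hc
        rw [show PySem.Chars.splitOn.go ['"'] (n+1) ('"' :: rest) cur acc
            = PySem.Chars.splitOn.go ['"'] n (List.drop 1 ('"' :: rest)) [] (cur.reverse :: acc) from by
          simp [PySem.Chars.splitOn.go, List.isPrefixOf]]
        rw [ih _ _ _ (by simpa using Nat.le_of_succ_le_succ h)]
        simp [pvSplit]
      · rw [show PySem.Chars.splitOn.go ['"'] (n+1) (c :: rest) cur acc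
            = PySem.Chars.splitOn.go ['"'] n rest (c :: cur) acc from by
          simp [PySem.Chars.splitOn.go, List.isPrefixOf, Ne.symm hc]]
        rw [ih _ _ _ (by simpa using Nat.le_of_succ_le_succ h)]
        simp [pvSplit, hc]

theorem pvSplitOn_eq (cs : List Char) :
    PySem.Chars.splitOn cs ['"'] = pvSplit cs [] := by
  rw [show PySem.Chars.splitOn cs ['"'] = PySem.Chars.splitOn.go ['"'] (cs.length + 1) cs [] [] from rfl]
  rw [pvGo_eq _ _ _ _ (Nat.le_succ _)]
  rfl

-- count.go for a one-character pattern is List.count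
theorem pvCountGo_eq (p : Char) (fuel : Nat) : ∀ (l : List Char) (acc : Nat),
    l.length ≤ fuel →
    PySem.Chars.count.go [p] fuel l acc = acc + l.count p := by
  induction fuel with
  | zero =>
    intro l acc h
    have : l = [] := List.length_eq_zero_iff.mp (Nat.le_zero.mp h)
    subst this
    simp [PySem.Chars.count.go]
  | succ n ih =>
    intro l acc h
    cases l with
    | nil => simp [PySem.Chars.count.go]
    | cons c rest =>
      by_cases hc : c = p
      · subst hc
        rw [show PySem.Chars.count.go [c] (n+1) (c :: rest) acc
            = PySem.Chars.count.go [c] n (List.drop 1 (c :: rest)) (acc + 1) from by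
          simp [PySem.Chars.count.go, List.isPrefixOf]]
        rw [ih _ _ (by simpa using Nat.le_of_succ_le_succ h)]
        simp
        omega
      · rw [show PySem.Chars.count.go [p] (n+1) (c :: rest) acc
            = PySem.Chars.count.go [p] n rest acc from by
          simp [PySem.Chars.count.go, List.isPrefixOf, Ne.symm hc]]
        rw [ih _ _ (by simpa using Nat.le_of_succ_le_succ h)]
        simp [hc]

theorem pvCount_eq (l : List Char) (p : Char) :
    PySem.Chars.count l [p] = l.count p := by
  rw [show PySem.Chars.count l [p] = PySem.Chars.count.go [p] l.length l 0 from rfl]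
  rw [pvCountGo_eq p l.length l 0 (le_refl _)]
  simp

-- enumerate-filter-even sums are pvEven / pvOdd, by parity of the start index
theorem pvEnumSum (ps : List (List Char)) : ∀ (s : Nat),
    ((((PySem.List.enumerate ps (s : Int)).filter (fun q => PySem.Int.mod q.1 2 == 0)).map
        (fun q => (PySem.Chars.count q.2 ['('] : Int))).sum,
     (((PySem.List.enumerate ps (s : Int)).filter (fun q => PySem.Int.mod q.1 2 == 0)).map
        (fun q => (PySem.Chars.count q.2 [')'] : Int))).sum)
    = (if s % 2 = 0 then pvEven ps else pvOdd ps) := by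
  induction ps with
  | nil => intro s; simp [PySem.List.enumerate_nil, pvEven, pvOdd]
  | cons p rest ih =>
    intro s
    have hcast : ((s : Int) + 1) = (((s + 1 : Nat)) : Int) := by push_cast; ring
    have ih' := ih (s + 1)
    rw [Prod.mk.injEq] at ih'
    rw [PySem.List.enumerate_cons, hcast]
    by_cases hs : s % 2 = 0
    · have hfil : (PySem.Int.mod (s : Int) 2 == 0) = true := by
        have h2 : PySem.Int.mod (s : Int) 2 = ((s % 2 : Nat) : Int) := by
          exact_mod_cast PySem.Int.mod_natCast s 2
        rw [h2, hs]; rfl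
      rw [if_neg (by omega : ¬ (s + 1) % 2 = 0)] at ih'
      simp only [List.filter_cons, hfil, if_true, List.map_cons, List.sum_cons, if_pos hs]
      rw [Prod.mk.injEq]
      constructor
      · show (PySem.Chars.count p ['('] : Int) + _ = _
        rw [ih'.1, pvCount_eq]
        cases rest <;> simp [pvEven, pvOdd]
      · show (PySem.Chars.count p [')'] : Int) + _ = _
        rw [ih'.2, pvCount_eq]
        cases rest <;> simp [pvEven, pvOdd]
    · have hfil : (PySem.Int.mod (s : Int) 2 == 0) = false := by
        have h2 : PySem.Int.mod (s : Int) 2 = ((s % 2 : Nat) : Int) := by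
          exact_mod_cast PySem.Int.mod_natCast s 2
        rw [h2, (by omega : s % 2 = 1)]; rfl
      rw [if_pos (by omega : (s + 1) % 2 = 0)] at ih'
      simp only [List.filter_cons, hfil, Bool.false_eq_true, if_false, if_neg hs]
      rw [Prod.mk.injEq]
      exact ⟨by rw [ih'.1]; cases rest <;> simp [pvEven, pvOdd],
             by rw [ih'.2]; cases rest <;> simp [pvEven, pvOdd]⟩

-- the split-based sums compute pvG
theorem pvSplit_even (cs : List Char) : ∀ (cur : List Char),
    pvEven (pvSplit cs cur)
      = ((cur.reverse.count '(' : Int) + (pvG cs false).1,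
         (cur.reverse.count ')' : Int) + (pvG cs false).2)
    ∧ pvOdd (pvSplit cs cur) = pvG cs true := by
  induction cs with
  | nil => intro cur; simp [pvSplit, pvEven, pvOdd, pvG]
  | cons c rest ih =>
    intro cur
    by_cases hc : c = '"'
    · subst hc
      have h1 := (ih []).1
      have h2 := (ih []).2
      simp only [List.reverse_nil, List.count_nil, Nat.cast_zero, zero_add] at h1
      simp [pvSplit, pvG, pvEven, pvOdd, h1, h2]
    · refine ⟨?_, ?_⟩
      · rw [show pvSplit (c :: rest) cur = pvSplit rest (c :: cur) from by simp [pvSplit, hc]]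
        rw [(ih (c :: cur)).1]
        by_cases hop : c = '('
        · subst hop
          simp [pvG, hc, Prod.ext_iff]
          ring
        · by_cases hcl : c = ')'
          · subst hcl
            simp [pvG, hc, Prod.ext_iff]
            ring
          · simp [pvG, hc, hop, hcl]
      · rw [show pvSplit (c :: rest) cur = pvSplit rest (c :: cur) from by simp [pvSplit, hc]]
        rw [(ih (c :: cur)).2]
        simp [pvG, hc]

-- ===== VERDICT (by name: the statement is the Claim_ definition above) =====
theorem count_parenthesis_spec : Claim_equal_count_parenthesis := by
  intro line _
  unfold Spec_count_parenthesis count_parenthesis count_parenthesis_alt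
  rw [pvSplitOn_eq]
  have hb := pvEnumSum (pvSplit line.toList []) 0
  rw [show ((0 : Nat) : Int) = (0 : Int) from rfl, if_pos (by decide : (0 : Nat) % 2 = 0),
    Prod.mk.injEq] at hb
  have hEven := (pvSplit_even line.toList []).1
  simp only [List.reverse_nil, List.count_nil, Nat.cast_zero, zero_add] at hEven
  have ha := pvA_fold line.toList 0 0 false
  simp only [ha, hb.1, hb.2, hEven]
  simp
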